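-- pv_equiv track=rewrite | github.com/Frederic-Barcelone/ese | corpus_metadata/B_parsing/B08_eligibility_parser.py | _split_on_operators
-- ===== SOURCE A (Python) =====
-- from typing import Any, Dict, List, Optional
--
-- def _split_on_operators(text: str) -> List[str]:
--     """Split text on logical operators while preserving parentheses."""
--     # First, handle parentheses
--     text = text.replace("(", " ( ").replace(")", " ) ")
--
--     # Split on AND/OR patterns
--     parts: list[str] = []
--     current: list[str] = []
--
--     # Simple tokenization - split on spaces and recognize operators
--     words = text.split()
--     i = 0
--     while i < len(words):
--         word = words[i]
--
--         if word in "()":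
--             if current:
--                 parts.append(" ".join(current))
--                 current = []
--             parts.append(word)
--         elif word.lower() == "and" or word == "&":
--             if current:
--                 parts.append(" ".join(current))
--                 current = []
--             parts.append("AND")
--         elif word.lower() == "or" or word == "|":
--             if current:
--                 parts.append(" ".join(current))
--                 current = []
--             parts.append("OR")
--         elif word == ";":
--             if current:
--                 parts.append(" ".join(current))
--                 current = []
--             parts.append("AND")  # Treat semicolon as AND
--         else:
--             current.append(word)
--
--         i += 1
--
--     if current:
--         parts.append(" ".join(current))
--
--     return parts
-- ===== SOURCE B (Python) =====
-- from typing import List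
--
-- _OPS = {"and": "AND", "&": "AND", "or": "OR", "|": "OR", ";": "AND", "(": "(", ")": ")"}
--
-- def _split_on_operators(text: str) -> List[str]:
--     """Split text on logical operators while preserving parentheses."""
--     words = text.replace("(", " ( ").replace(")", " ) ").split()
--     out: List[str] = []
--     i, n = 0, len(words)
--     while i < n:
--         tok = _OPS.get(words[i].lower())
--         if tok is not None:
--             out.append(tok)
--             i += 1
--         else:
--             j = i + 1
--             while j < n and _OPS.get(words[j].lower()) is None:
--                 j += 1
--             out.append(" ".join(words[i:j]))
--             i = j
--     return out
-- ===== Notes on version B (the rewrite author's own statement) =====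
-- stated objective: alternative
-- what changed: A threads a `current` word-accumulator through one if/elif chain per word; B classifies each word by a single dict lookup on its lowercase form and emits operator tokens directly, joining each maximal run of ordinary words found by an inner scan (no accumulator state across iterations).
import Mathlib
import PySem

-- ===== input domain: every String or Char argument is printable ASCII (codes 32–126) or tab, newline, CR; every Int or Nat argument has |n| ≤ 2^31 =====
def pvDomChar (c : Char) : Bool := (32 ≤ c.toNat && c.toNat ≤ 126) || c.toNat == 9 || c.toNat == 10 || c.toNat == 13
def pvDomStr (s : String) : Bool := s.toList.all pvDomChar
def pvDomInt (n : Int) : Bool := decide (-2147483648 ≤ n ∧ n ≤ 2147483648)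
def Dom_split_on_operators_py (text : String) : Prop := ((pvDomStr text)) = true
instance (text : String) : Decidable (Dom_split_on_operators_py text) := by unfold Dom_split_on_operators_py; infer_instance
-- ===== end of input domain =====

-- B replaces A's accumulator loop by dict-driven classification plus an inner run scan (objective: alternative decomposition, same cost).

-- ===== PORT A =====
-- the body of A's while loop (one step of the word scan, state = (parts, current))
def split_on_operators_step (st : List String × List String) (word : String) : List String × List String :=
  if PySem.Str.isIn word "()" then
    ((if st.2.isEmpty then st.1 else st.1 ++ [PySem.Str.join " " st.2]) ++ [word], [])
  else if PySem.Str.lower word = "and" ∨ word = "&" then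
    ((if st.2.isEmpty then st.1 else st.1 ++ [PySem.Str.join " " st.2]) ++ ["AND"], [])
  else if PySem.Str.lower word = "or" ∨ word = "|" then
    ((if st.2.isEmpty then st.1 else st.1 ++ [PySem.Str.join " " st.2]) ++ ["OR"], [])
  else if word = ";" then
    ((if st.2.isEmpty then st.1 else st.1 ++ [PySem.Str.join " " st.2]) ++ ["AND"], [])
  else (st.1, st.2 ++ [word])

def split_on_operators_py (text : String) : List String :=
  let words := PySem.Str.split₀ (PySem.Str.replace (PySem.Str.replace text "(" " ( ") ")" " ) ")
  let res := words.foldl split_on_operators_step ([], [])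
  if res.2.isEmpty then res.1 else res.1 ++ [PySem.Str.join " " res.2]

-- ===== PORT B =====
-- the OPS dict literal of Source B
def pvOps : PySem.Dict String String :=
  PySem.Dict.mk [("and", "AND"), ("&", "AND"), ("or", "OR"), ("|", "OR"), (";", "AND"), ("(", "("), (")", ")")]

-- OPS.get(w.lower())
def pvCanon (w : String) : Option String := PySem.Dict.get? pvOps (PySem.Str.lower w)

def pvIsWord (w : String) : Bool := (pvCanon w).isNone

-- the outer while loop of Source B over the remaining words; the inner run scan is the takeWhile/dropWhile pair
def pvChunks : List String → List String
  | [] => []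
  | w :: ws =>
    match pvCanon w with
    | some tok => tok :: pvChunks ws
    | none =>
        PySem.Str.join " " (w :: ws.takeWhile pvIsWord) :: pvChunks (ws.dropWhile pvIsWord)
termination_by l => l.length
decreasing_by
  · simp
  · simpa [Nat.lt_succ_iff] using (List.dropWhile_sublist (l := ws) (p := pvIsWord)).length_le

def split_on_operators_py_alt (text : String) : List String :=
  pvChunks (PySem.Str.split₀ (PySem.Str.replace (PySem.Str.replace text "(" " ( ") ")" " ) "))

-- ===== PRECONDITION & SPEC =====
def Spec_split_on_operators_py (text : String) (out : List String) : Prop := out = split_on_operators_py_alt text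
instance (text : String) (out : List String) : Decidable (Spec_split_on_operators_py text out) := by unfold Spec_split_on_operators_py; infer_instance

-- ===== CLAIM (what is proved, stated in full; the proofs are below) =====
def Claim_equal_split_on_operators_py : Prop := ∀ (text : String), Dom_split_on_operators_py text → Spec_split_on_operators_py text (split_on_operators_py text)

-- ===== LEMMAS AND PROOFS =====

-- A's per-word branch chain, as a classification (proof-only view of split_on_operators_step)
def pvClassA (w : String) : Option String :=
  if PySem.Str.isIn w "()" then some w
  else if PySem.Str.lower w = "and" ∨ w = "&" then some "AND"
  else if PySem.Str.lower w = "or" ∨ w = "|" then some "OR"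
  else if w = ";" then some "AND"
  else none

theorem pvStep_eq (st : List String × List String) (w : String) :
    split_on_operators_step st w =
      match pvClassA w with
      | some tok => ((if st.2.isEmpty then st.1 else st.1 ++ [PySem.Str.join " " st.2]) ++ [tok], [])
      | none => (st.1, st.2 ++ [w]) := by
  unfold split_on_operators_step pvClassA
  split_ifs <;> rfl

-- suffix form of A's loop
def pvFA : List String → List String → List String
  | [], cur => if cur.isEmpty then [] else [PySem.Str.join " " cur]
  | w :: ws, cur =>
    match pvClassA w with
    | some tok => (if cur.isEmpty then [] else [PySem.Str.join " " cur]) ++ tok :: pvFA ws []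
    | none => pvFA ws (cur ++ [w])


theorem pvFoldl_eq (words : List String) : ∀ (parts cur : List String),
    (if (words.foldl split_on_operators_step (parts, cur)).2.isEmpty
     then (words.foldl split_on_operators_step (parts, cur)).1
     else (words.foldl split_on_operators_step (parts, cur)).1
          ++ [PySem.Str.join " " (words.foldl split_on_operators_step (parts, cur)).2])
    = parts ++ pvFA words cur := by
  induction words with
  | nil =>
      intro parts cur
      cases hc : cur.isEmpty <;> simp [pvFA, hc, List.foldl]
  | cons w ws ih =>
      intro parts cur
      rw [List.foldl_cons, pvStep_eq]
      cases hc : pvClassA w with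
      | some tok =>
          rw [ih]
          simp only [pvFA, hc]
          split_ifs <;> simp
      | none =>
          rw [ih]
          simp [pvFA, hc]
theorem pvLowerChar_eq (c d : Char) (hd1 : ¬(97 ≤ d.toNat ∧ d.toNat ≤ 122)) (hd2 : ¬(65 ≤ d.toNat ∧ d.toNat ≤ 90)) :
    PySem.Chars.lowerChar c = d ↔ c = d := by
  unfold PySem.Chars.lowerChar PySem.Chars.isupper
  split_ifs with h
  · simp only [Bool.and_eq_true, decide_eq_true_eq] at h
    have h1 : 65 ≤ c.toNat := h.1
    have h2 : c.toNat ≤ 90 := h.2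
    have ht : (Char.ofNat (c.toNat + 32)).toNat = c.toNat + 32 := by
      simp [Char.ofNat, show (c.toNat + 32).isValidChar by left; omega]
    constructor
    · intro he
      exact absurd (by rw [← he, ht]; omega) hd1
    · intro he
      exact absurd (by rw [← he]; exact ⟨h1, h2⟩) hd2
  · exact ⟨fun he => he, fun he => he⟩

-- Str.lower w = s ↔ w = s for a one-char non-letter s
theorem pvLowerFix (w s : String) (d : Char) (hs : s.toList = [d])
    (hd1 : ¬(97 ≤ d.toNat ∧ d.toNat ≤ 122)) (hd2 : ¬(65 ≤ d.toNat ∧ d.toNat ≤ 90)) :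
    (PySem.Str.lower w = s) ↔ w = s := by
  rw [← String.toList_inj, ← String.toList_inj, PySem.Str.toList_lower, hs]
  unfold PySem.Chars.lower
  rw [List.map_eq_singleton_iff]
  constructor
  · rintro ⟨c, hc, hl⟩
    rw [(pvLowerChar_eq c d hd1 hd2).mp hl] at hc
    exact hc
  · intro hw
    exact ⟨d, hw, (pvLowerChar_eq d d hd1 hd2).mpr rfl⟩
theorem pvInfixPair (l : List Char) (h : l <:+: ['(', ')']) :
    l = [] ∨ l = ['('] ∨ l = [')'] ∨ l = ['(', ')'] := by
  have hsub := h.sublist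
  have hlen := hsub.length_le
  match l, hsub with
  | [], _ => exact Or.inl rfl
  | [a], hs =>
      have ha : a = '(' ∨ a = ')' := by simpa using hs.subset (List.mem_cons_self ..)
      rcases ha with rfl | rfl
      · exact Or.inr (Or.inl rfl)
      · exact Or.inr (Or.inr (Or.inl rfl))
  | [a, b], hs =>
      exact Or.inr (Or.inr (Or.inr (hs.eq_of_length (by simp))))
  | a :: b :: c :: t, _ => simp at hlen

theorem pvParen (w : String) (h1 : w ≠ "") (h2 : w ≠ "()")
    (h : PySem.Str.isIn w "()" = true) : w = "(" ∨ w = ")" := by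
  rw [PySem.Str.isIn_iff_infix] at h
  have h' : w.toList <:+: ['(', ')'] := by simpa using h
  rcases pvInfixPair _ h' with h0 | h0 | h0 | h0
  · exact absurd (String.toList_inj.mp (by simpa using h0)) h1
  · exact Or.inl (String.toList_inj.mp (by simpa using h0))
  · exact Or.inr (String.toList_inj.mp (by simpa using h0))
  · exact absurd (String.toList_inj.mp (by simpa using h0)) h2
theorem pvCanon_eq (w : String) : pvCanon w =
    (if PySem.Str.lower w = "and" then some "AND"
     else if PySem.Str.lower w = "&" then some "AND"
     else if PySem.Str.lower w = "or" then some "OR"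
     else if PySem.Str.lower w = "|" then some "OR"
     else if PySem.Str.lower w = ";" then some "AND"
     else if PySem.Str.lower w = "(" then some "("
     else if PySem.Str.lower w = ")" then some ")"
     else none) := by
  unfold pvCanon pvOps PySem.Dict.get?
  by_cases e1 : PySem.Str.lower w = "and" <;>
  by_cases e2 : PySem.Str.lower w = "&" <;>
  by_cases e3 : PySem.Str.lower w = "or" <;>
  by_cases e4 : PySem.Str.lower w = "|" <;>
  by_cases e5 : PySem.Str.lower w = ";" <;>
  by_cases e6 : PySem.Str.lower w = "(" <;>
  by_cases e7 : PySem.Str.lower w = ")" <;>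
  all_goals try simp_all [List.find?]
  all_goals have f1 : (("and" : String) == PySem.Str.lower w) = false := beq_eq_false_iff_ne.mpr (fun h => e1 h.symm)
  all_goals have f2 : (("&" : String) == PySem.Str.lower w) = false := beq_eq_false_iff_ne.mpr (fun h => e2 h.symm)
  all_goals have f3 : (("or" : String) == PySem.Str.lower w) = false := beq_eq_false_iff_ne.mpr (fun h => e3 h.symm)
  all_goals have f4 : (("|" : String) == PySem.Str.lower w) = false := beq_eq_false_iff_ne.mpr (fun h => e4 h.symm)
  all_goals have f5 : ((";" : String) == PySem.Str.lower w) = false := beq_eq_false_iff_ne.mpr (fun h => e5 h.symm)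
  all_goals have f6 : (("(" : String) == PySem.Str.lower w) = false := beq_eq_false_iff_ne.mpr (fun h => e6 h.symm)
  all_goals have f7 : ((")" : String) == PySem.Str.lower w) = false := beq_eq_false_iff_ne.mpr (fun h => e7 h.symm)
  all_goals simp [f1, f2, f3, f4, f5, f6, f7]
theorem pvClass_eq (w : String) (h1 : w ≠ "") (h2 : w ≠ "()") : pvClassA w = pvCanon w := by
  rw [pvCanon_eq]
  by_cases hp : PySem.Str.isIn w "()" = true
  · rcases pvParen w h1 h2 hp with rfl | rfl <;> decide
  · have hAmp : (PySem.Str.lower w = "&") ↔ w = "&" := pvLowerFix w "&" '&' (by decide) (by decide) (by decide)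
    have hBar : (PySem.Str.lower w = "|") ↔ w = "|" := pvLowerFix w "|" '|' (by decide) (by decide) (by decide)
    have hSem : (PySem.Str.lower w = ";") ↔ w = ";" := pvLowerFix w ";" ';' (by decide) (by decide) (by decide)
    have hLp : (PySem.Str.lower w = "(") ↔ w = "(" := pvLowerFix w "(" '(' (by decide) (by decide) (by decide)
    have hRp : (PySem.Str.lower w = ")") ↔ w = ")" := pvLowerFix w ")" ')' (by decide) (by decide) (by decide)
    have hLp' : ¬(PySem.Str.lower w = "(") := fun h => hp (by rw [hLp.mp h]; decide)
    have hRp' : ¬(PySem.Str.lower w = ")") := fun h => hp (by rw [hRp.mp h]; decide)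
    unfold pvClassA
    rw [if_neg hp]
    simp only [hAmp.symm, hBar.symm, hSem.symm]
    split_ifs with g1 g2 g3 g4 g5 g6 g7 g8 g9 <;> try rfl
    all_goals simp_all
theorem pvG (words : List String) (H : ∀ w ∈ words, w ≠ "" ∧ w ≠ "()") :
    pvFA words [] = pvChunks words ∧
    (∀ cur, cur ≠ [] → pvFA words cur =
      PySem.Str.join " " (cur ++ words.takeWhile pvIsWord) :: pvChunks (words.dropWhile pvIsWord)) := by
  induction words with
  | nil =>
      refine ⟨by simp [pvFA, pvChunks], ?_⟩
      intro cur hcur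
      simp [pvFA, pvChunks, hcur]
  | cons w ws ih =>
      have hw := H w (List.mem_cons_self ..)
      have ihh := ih (fun x hx => H x (List.mem_cons_of_mem _ hx))
      have hcw : pvClassA w = pvCanon w := pvClass_eq w hw.1 hw.2
      cases hc : pvCanon w with
      | some tok =>
          have hwd : pvIsWord w = false := by simp [pvIsWord, hc]
          constructor
          · simp only [pvFA, hcw, hc, List.isEmpty_nil]
            rw [pvChunks.eq_def]
            simp [hc, ihh.1]
          · intro cur hcur
            simp only [pvFA, hcw, hc]
            rw [pvChunks.eq_def]
            simp [hc, hwd, hcur, ihh.1]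
      | none =>
          have hwd : pvIsWord w = true := by simp [pvIsWord, hc]
          constructor
          · simp only [pvFA, hcw, hc, List.nil_append]
            rw [pvChunks.eq_def]
            simp only [hc]
            exact ihh.2 [w] (by simp)
          · intro cur hcur
            simp only [pvFA, hcw, hc]
            rw [ihh.2 (cur ++ [w]) (by simp)]
            simp [hwd]
-- accumulator-free form of PySem.Chars.replace.go
def pvRep (old new : List Char) : Nat → List Char → List Char
  | 0, l => l
  | _ + 1, [] => []
  | fuel + 1, c :: t =>
      if old.isPrefixOf (c :: t) then new ++ pvRep old new fuel ((c :: t).drop old.length)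
      else c :: pvRep old new fuel t

theorem pvRep_go (old new : List Char) : ∀ (fuel : Nat) (l acc : List Char),
    PySem.Chars.replace.go old new fuel l acc = acc.reverse ++ pvRep old new fuel l := by
  intro fuel
  induction fuel with
  | zero => intro l acc; simp [PySem.Chars.replace.go, pvRep]
  | succ n ih =>
      intro l acc
      cases l with
      | nil => simp [PySem.Chars.replace.go, pvRep]
      | cons c t =>
          rw [PySem.Chars.replace.go]
          rw [pvRep]
          split_ifs with h
          · rw [ih]; simp
          · rw [ih]; simp
-- every ')' in the list is immediately preceded by ' '
def pvGoodR : List Char → Prop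
  | [] => True
  | [_] => True
  | a :: b :: t => (b = ')' → a = ' ') ∧ pvGoodR (b :: t)

theorem pvGoodR_space_cons (r : List Char) (h : pvGoodR r) : pvGoodR (' ' :: r) := by
  cases r with
  | nil => trivial
  | cons d r' => exact ⟨fun _ => rfl, h⟩

theorem pvRep_nil (old new : List Char) : ∀ fuel, pvRep old new fuel [] = [] := by
  intro fuel; cases fuel <;> rfl

theorem pvRepGood : ∀ (fuel : Nat) (l : List Char), l.length ≤ fuel →
    pvGoodR (pvRep [')'] [' ', ')', ' '] fuel l) ∧
    (pvRep [')'] [' ', ')', ' '] fuel l).head? = l.head?.map (fun c => if c = ')' then ' ' else c) := by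
  intro fuel
  induction fuel with
  | zero =>
      intro l hl
      have : l = [] := List.eq_nil_of_length_eq_zero (Nat.le_zero.mp hl)
      subst this
      exact ⟨trivial, rfl⟩
  | succ n ih =>
      intro l hl
      cases l with
      | nil => exact ⟨trivial, rfl⟩
      | cons c t =>
          rw [pvRep]
          by_cases hc : c = ')'
          · subst hc
            rw [if_pos (by simp [List.isPrefixOf])]
            simp only [List.length_cons] at hl
            have iht := ih t (by omega)
            refine ⟨?_, by simp⟩
            have h3 : pvGoodR (' ' :: pvRep [')'] [' ', ')', ' '] n ((')' :: t).drop 1)) := by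
              simpa using pvGoodR_space_cons _ iht.1
            exact ⟨fun _ => rfl, ⟨fun h => absurd h (by decide), by simpa using h3⟩⟩
          · rw [if_neg (by simp [List.isPrefixOf]; exact fun h => hc h.symm)]
            simp only [List.length_cons] at hl
            have iht := ih t (by omega)
            refine ⟨?_, by simp [hc]⟩
            cases t with
            | nil => rw [pvRep_nil]; trivial
            | cons d t' =>
                cases hrep : pvRep [')'] [' ', ')', ' '] n (d :: t') with
                | nil => trivial
                | cons e r =>
                    have hh : e = if d = ')' then ' ' else d := by
                      have h0 := iht.2
                      rw [hrep] at h0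
                      simpa using h0
                    refine ⟨?_, by have g := iht.1; rw [hrep] at g; exact g⟩
                    intro he
                    exfalso
                    by_cases hd : d = ')'
                    · rw [if_pos hd] at hh
                      rw [hh] at he
                      exact absurd he (by decide)
                    · rw [if_neg hd] at hh
                      exact hd (hh.symm.trans he)
-- accumulator-free form of PySem.Chars.split₀.go
def pvGo : List Char → List Char → List (List Char)
  | [], cur => if cur.isEmpty then [] else [cur.reverse]
  | c :: rest, cur =>
      if PySem.Chars.isspace c then
        (if cur.isEmpty then pvGo rest [] else cur.reverse :: pvGo rest [])
      else pvGo rest (c :: cur)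

theorem pvGo_go : ∀ (s cur : List Char) (acc : List (List Char)),
    PySem.Chars.split₀.go s cur acc = acc.reverse ++ pvGo s cur := by
  intro s
  induction s with
  | nil =>
      intro cur acc
      rw [PySem.Chars.split₀.go, pvGo]
      split_ifs with h <;> simp
  | cons c rest ih =>
      intro cur acc
      rw [PySem.Chars.split₀.go, pvGo]
      split_ifs with h1 h2 <;> rw [ih] <;> simp

theorem pvGoodR_append (a b : List Char) (h : pvGoodR (a ++ b)) : pvGoodR a ∧ pvGoodR b := by
  induction a with
  | nil =>
      exact ⟨trivial, h⟩
  | cons x a' iha =>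
      cases a' with
      | nil =>
          cases b with
          | nil => exact ⟨trivial, trivial⟩
          | cons y b' => exact ⟨trivial, h.2⟩
      | cons y a'' =>
          have h' : pvGoodR ((y :: a'') ++ b) := h.2
          exact ⟨⟨h.1, (iha h').1⟩, (iha h').2⟩

theorem pvGoodR_pair_ne (h : pvGoodR ['(', ')']) : False := by
  have := h.1 rfl
  exact absurd this (by decide)

theorem pvGoProp : ∀ (s cur : List Char), pvGoodR (cur.reverse ++ s) →
    ∀ w ∈ pvGo s cur, w ≠ [] ∧ w ≠ ['(', ')'] := by
  intro s
  induction s with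
  | nil =>
      intro cur h w hw
      rw [pvGo] at hw
      split_ifs at hw with hc
      · exact absurd hw (List.not_mem_nil)
      · have hw' : w = cur.reverse := by simpa using hw
        subst hw'
        refine ⟨by simpa using fun h0 => hc (by simpa using congrArg List.isEmpty h0), ?_⟩
        intro heq
        rw [List.append_nil] at h
        rw [heq] at h
        exact pvGoodR_pair_ne h
  | cons c rest ih =>
      intro cur h w hw
      rw [pvGo] at hw
      have hpre : pvGoodR cur.reverse ∧ pvGoodR (c :: rest) := pvGoodR_append _ _ h
      have hrest : pvGoodR rest := (pvGoodR_append [c] rest hpre.2).2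
      split_ifs at hw with h1 h2
      · exact ih [] (by simpa using hrest) w hw
      · rcases List.mem_cons.mp hw with rfl | hw'
        · refine ⟨by simpa using fun h0 => h2 (by simpa using congrArg List.isEmpty h0), ?_⟩
          intro heq
          rw [heq] at hpre
          exact pvGoodR_pair_ne hpre.1
        · exact ih [] (by simpa using hrest) w hw'
      · refine ih (c :: cur) ?_ w hw
        have : (c :: cur).reverse ++ rest = cur.reverse ++ (c :: rest) := by simp
        rw [this]
        exact h
theorem pvWordsProp (t : String) (w : String)
    (hw : w ∈ PySem.Str.split₀ (PySem.Str.replace t ")" " ) ")) : w ≠ "" ∧ w ≠ "()" := by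
  unfold PySem.Str.split₀ at hw
  rcases List.mem_map.mp hw with ⟨lw, hlw, rfl⟩
  have hcs : (PySem.Str.replace t ")" " ) ").toList
      = PySem.Chars.replace t.toList [')'] [' ', ')', ' '] := by
    rw [PySem.Str.toList_replace]
    rfl
  rw [hcs] at hlw
  have hrep : PySem.Chars.replace t.toList [')'] [' ', ')', ' ']
      = pvRep [')'] [' ', ')', ' '] t.toList.length t.toList := by
    unfold PySem.Chars.replace
    rw [if_neg (by decide)]
    rw [pvRep_go]
    rfl
  rw [hrep] at hlw
  have hgood : pvGoodR (pvRep [')'] [' ', ')', ' '] t.toList.length t.toList) :=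
    (pvRepGood _ _ (le_refl _)).1
  have hsplit : PySem.Chars.split₀ (pvRep [')'] [' ', ')', ' '] t.toList.length t.toList)
      = pvGo (pvRep [')'] [' ', ')', ' '] t.toList.length t.toList) [] := by
    unfold PySem.Chars.split₀
    rw [pvGo_go]
    rfl
  rw [hsplit] at hlw
  have hprop := pvGoProp _ [] (by simpa using hgood) lw hlw
  constructor
  · intro h0
    exact hprop.1 (by simpa using congrArg String.toList h0)
  · intro h0
    exact hprop.2 (by simpa using congrArg String.toList h0)

-- ===== VERDICT (by name: the statement is the Claim_ definition above) =====
theorem split_on_operators_py_spec : Claim_equal_split_on_operators_py := by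
  intro text _
  show split_on_operators_py text = split_on_operators_py_alt text
  unfold split_on_operators_py split_on_operators_py_alt
  simp only []
  rw [pvFoldl_eq, List.nil_append]
  exact (pvG _ (fun w hw => pvWordsProp _ w hw)).1
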